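-- pv_equiv track=rewrite | github.com/minyez/mykit | mykit/core/lattice.py | sym_nat_from_atoms
-- ===== SOURCE A (Python) =====
-- def sym_nat_from_atoms(atoms):
--     '''Generate lists of atomic symbols and number of atoms from whole atoms list
--
--     The order of appearence of the element is conserved in the output.
--
--     Args :
--         atoms (list of str) : symbols of each atom in the lattice
--
--     Returns :
--         list of str : atomic symbols
--         list of int : number of atoms for each symbol
--
--     Examples:
--     >>> sym_nat_from_atoms(["C", "Al", "Al", "C", "Al", "F"])
--     ["C", "Al", "F"], [2, 3, 1]
--     '''
--     _syms = []
--     _natsDict = {}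
--     for _at in atoms:
--         if _at in _syms:
--             _natsDict[_at] += 1
--         else:
--             _syms.append(_at)
--             _natsDict.update({_at: 1})
--     return _syms, [_natsDict[_at] for _at in _syms]
-- ===== SOURCE B (Python) =====
-- def sym_nat_from_atoms(atoms):
--     # Extract-and-eliminate: repeatedly take the first remaining symbol,
--     # count ALL of its occurrences at once, then filter them out and continue
--     # on the shrunk list.  No dict and no membership test against the output.
--     syms = []
--     nats = []
--     rest = list(atoms)
--     while rest:
--         s = rest[0]
--         syms.append(s)
--         nats.append(rest.count(s))
--         rest = [a for a in rest if a != s]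
--     return syms, nats
-- ===== Notes on version B (the rewrite author's own statement) =====
-- stated objective: alternative
-- what changed: A makes one interleaved pass keeping an order list plus a count dict per element; B uses an extract-and-eliminate loop over a shrinking worklist: take the first remaining symbol, count all its occurrences with rest.count, filter them out, repeat, so it loops per distinct symbol instead of per atom and keeps no dict.
import Mathlib
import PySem

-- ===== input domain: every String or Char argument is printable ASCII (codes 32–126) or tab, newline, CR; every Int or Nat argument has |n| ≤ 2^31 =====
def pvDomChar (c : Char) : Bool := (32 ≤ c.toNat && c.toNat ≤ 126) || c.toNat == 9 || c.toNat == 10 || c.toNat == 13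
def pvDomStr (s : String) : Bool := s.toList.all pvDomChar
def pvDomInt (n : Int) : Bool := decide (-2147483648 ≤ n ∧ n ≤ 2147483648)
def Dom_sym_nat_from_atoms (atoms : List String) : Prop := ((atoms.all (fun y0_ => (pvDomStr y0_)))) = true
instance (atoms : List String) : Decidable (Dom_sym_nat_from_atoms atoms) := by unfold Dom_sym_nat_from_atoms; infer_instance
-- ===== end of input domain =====

-- B replaces A's single interleaved pass (order list + count dict per atom) by an
-- extract-and-eliminate worklist loop: take the first remaining symbol, count all its
-- occurrences, filter them out, repeat (alternative decomposition, no dict; similar cost).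

-- ===== PORT A =====
-- loop state: (_syms, _natsDict). `_natsDict[_at] += 1` only runs when _at ∈ _syms,
-- where the key is always present, so getD 0 computes the same value (exact on reachable states);
-- likewise the final `_natsDict[_at]` lookup has _at ∈ _syms, key present.
def sym_nat_from_atoms (atoms : List String) : List String × List Int :=
  let st := atoms.foldl (fun st at_ =>
    if PySem.Set.contains st.1 at_ then
      (st.1, st.2.insert at_ (st.2.getD at_ 0 + 1))
    else
      (st.1 ++ [at_], st.2.insert at_ 1))
    (([] : List String), (PySem.Dict.empty : PySem.Dict String Int))
  (st.1, st.1.map (fun at_ => st.2.getD at_ 0))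

-- ===== PORT B =====
-- the while loop over the shrinking worklist `rest`, accumulators syms/nats appended to;
-- `rest.count(rest[0])` and the filtering comprehension are ported literally.
def symNatLoop : List String → List String → List Int → List String × List Int
  | [], syms, nats => (syms, nats)
  | s :: t, syms, nats =>
      symNatLoop ((s :: t).filter (fun a => a != s))
        (syms ++ [s]) (nats ++ [(PySem.List.count (s :: t) s : Int)])
termination_by rest _ _ => rest.length
decreasing_by
  simp only [List.filter_cons, bne_self_eq_false]
  exact Nat.lt_succ_of_le (List.length_filter_le _ _)

def sym_nat_from_atoms_alt (atoms : List String) : List String × List Int :=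
  symNatLoop atoms [] []

-- ===== PRECONDITION & SPEC =====
def Spec_sym_nat_from_atoms (atoms : List String) (out : List String × List Int) : Prop := out = sym_nat_from_atoms_alt atoms
instance (atoms : List String) (out : List String × List Int) : Decidable (Spec_sym_nat_from_atoms atoms out) := by unfold Spec_sym_nat_from_atoms; infer_instance

-- ===== CLAIM (what is proved, stated in full; the proofs are below) =====
def Claim_equal_sym_nat_from_atoms : Prop := ∀ (atoms : List String), Dom_sym_nat_from_atoms atoms → Spec_sym_nat_from_atoms atoms (sym_nat_from_atoms atoms)

-- ===== LEMMAS AND PROOFS =====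
-- Both programs are reduced to the common normal form
-- (dedup atoms, (dedup atoms).map (fun x => (atoms.count x : Int))).

-- A's interleaved loop splits into two independent folds,
-- under the invariant that the syms list and the dict have the same members.
theorem loopA_split (l : List String) (s : List String) (d : PySem.Dict String Int)
    (H : ∀ x, PySem.Set.contains s x = d.contains x) :
    l.foldl (fun st at_ =>
      if PySem.Set.contains st.1 at_ then
        (st.1, st.2.insert at_ (st.2.getD at_ 0 + 1))
      else
        (st.1 ++ [at_], st.2.insert at_ 1)) (s, d)
    = (l.foldl PySem.Set.add s, l.foldl (fun d a => d.insert a (d.getD a 0 + 1)) d) := by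
  induction l generalizing s d with
  | nil => rfl
  | cons a t ih =>
    simp only [List.foldl_cons]
    by_cases hmem : a ∈ s
    · rw [if_pos ((PySem.Set.contains_iff s a).mpr hmem), PySem.Set.add_of_mem hmem]
      refine ih s _ (fun x => ?_)
      rw [PySem.Dict.contains_insert]
      by_cases hx : x = a
      · subst hx
        simp [PySem.Set.contains, hmem]
      · simp only [beq_eq_false_iff_ne.mpr hx, Bool.false_or]
        exact H x
    · have hc : PySem.Set.contains s a = false := by simp [PySem.Set.contains, hmem]
      have hdc : d.contains a = false := by rw [← H a]; exact hc
      rw [if_neg (by simpa [PySem.Set.contains] using hmem), PySem.Set.add_of_not_mem hmem,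
        PySem.Dict.getD_of_not_contains d 0 hdc]
      have h01 : (0 : Int) + 1 = 1 := rfl
      rw [h01]
      refine ih (s ++ [a]) _ (fun x => ?_)
      rw [PySem.Dict.contains_insert]
      by_cases hx : x = a
      · subst hx
        simp [PySem.Set.contains]
      · simp only [beq_eq_false_iff_ne.mpr hx, Bool.false_or, ← H x]
        simp [PySem.Set.contains, hx]

theorem A_normal (atoms : List String) :
    sym_nat_from_atoms atoms
      = (PySem.List.dedup atoms,
         (PySem.List.dedup atoms).map (fun x => (atoms.count x : Int))) := by
  unfold sym_nat_from_atoms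
  rw [loopA_split atoms [] PySem.Dict.empty
    (fun x => by simp [PySem.Set.contains_eq_listContains])]
  simp only [PySem.List.dedup_eq_ofList, PySem.Set.ofList_eq_foldl,
    PySem.Dict.getD_foldl_insert_add_one, PySem.Dict.getD_empty, zero_add]

-- Set.add of a fresh prepended element commutes out of the fold.
theorem foldl_add_cons_of_not_mem (s : String) :
    ∀ (l : List String) (acc : List String), (∀ a ∈ l, a ≠ s) →
      l.foldl PySem.Set.add (s :: acc) = s :: l.foldl PySem.Set.add acc := by
  intro l
  induction l with
  | nil => intro acc _; rfl
  | cons a t ih =>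
    intro acc h
    have ha : a ≠ s := h a (List.mem_cons_self)
    have h1 : PySem.Set.add (s :: acc) a
        = s :: PySem.Set.add acc a := by
      by_cases hm : a ∈ acc
      · rw [PySem.Set.add_of_mem hm, PySem.Set.add_of_mem (List.mem_cons_of_mem s hm)]
      · rw [PySem.Set.add_of_not_mem hm, PySem.Set.add_of_not_mem
          (by simp [ha, hm]), List.cons_append]
    simp only [List.foldl_cons, h1]
    exact ih _ (fun b hb => h b (List.mem_cons_of_mem a hb))

-- Filtering out an element already in the accumulator does not change the fold.
theorem foldl_add_filter_of_mem (s : String) :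
    ∀ (l : List String) (acc : List String), s ∈ acc →
      (l.filter (fun a => a != s)).foldl PySem.Set.add acc = l.foldl PySem.Set.add acc := by
  intro l
  induction l with
  | nil => intro acc _; rfl
  | cons a t ih =>
    intro acc hs
    by_cases ha : a = s
    · subst ha
      simpa [List.filter_cons, PySem.Set.add_of_mem hs] using ih acc hs
    · have hsa : s ∈ PySem.Set.add acc a := by
        by_cases hm : a ∈ acc
        · rwa [PySem.Set.add_of_mem hm]
        · rw [PySem.Set.add_of_not_mem hm]; exact List.mem_append_left _ hs
      simpa [List.filter_cons, bne_iff_ne, ha] using ih (PySem.Set.add acc a) hsa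

theorem dedup_cons (s : String) (t : List String) :
    PySem.List.dedup (s :: t) = s :: PySem.List.dedup (t.filter (fun a => a != s)) := by
  simp only [PySem.List.dedup_eq_ofList, PySem.Set.ofList_eq_foldl, List.foldl_cons]
  have h0 : PySem.Set.add ([] : List String) s = [s] :=
    PySem.Set.add_of_not_mem (List.not_mem_nil)
  rw [h0, ← foldl_add_filter_of_mem s t [s] (List.mem_cons_self)]
  exact foldl_add_cons_of_not_mem s _ [] (fun a ha => by
    have := List.of_mem_filter ha; simpa [bne_iff_ne] using this)

-- B's worklist loop, characterized against the common normal form.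
theorem loopB_normal :
    ∀ (rest : List String) (syms : List String) (nats : List Int),
      symNatLoop rest syms nats
        = (syms ++ PySem.List.dedup rest,
           nats ++ (PySem.List.dedup rest).map (fun x => (rest.count x : Int))) := by
  intro rest syms nats
  induction rest, syms, nats using symNatLoop.induct with
  | case1 syms nats => simp [symNatLoop, PySem.List.dedup]
  | case2 s t syms nats ih =>
    rw [symNatLoop]
    have hft : (s :: t).filter (fun a => a != s) = t.filter (fun a => a != s) := by
      simp
    rw [hft] at ih ⊢
    rw [ih, dedup_cons]
    have hcnt : ∀ x ∈ PySem.List.dedup (t.filter (fun a => a != s)),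
        ((t.filter (fun a => a != s)).count x : Int) = ((s :: t).count x : Int) := by
      intro x hx
      have hxf : x ∈ t.filter (fun a => a != s) := by
        simpa [PySem.List.mem_dedup] using hx
      have hxs : x ≠ s := by simpa [bne_iff_ne] using List.of_mem_filter hxf
      rw [List.count_filter (by simp [hxs]), List.count_cons_of_ne hxs.symm]
    simp only [List.map_cons, List.append_assoc, List.singleton_append,
      PySem.List.count_eq]
    rw [List.map_congr_left hcnt]

-- ===== VERDICT (by name: the statement is the Claim_ definition above) =====
theorem sym_nat_from_atoms_spec : Claim_equal_sym_nat_from_atoms := by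
  intro atoms _
  show _ = _
  rw [A_normal, sym_nat_from_atoms_alt, loopB_normal]
  simp
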